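-- pv_equiv track=rewrite | github.com/vinci1it2000/schedula | co2mpas/plot.py | get_model_paths
-- ===== SOURCE A (Python) =====
-- def get_model_paths(model_ids=None):
--     """
--     Returns all CO2MPAS models import paths.
--
--     :param model_ids:
--         List of models to be returned
--         (e.g., ['co2mpas.physical.physical', 'engine', ...]).
--
--         .. note:: It it is not specified all models will be returned.
--     :type model_ids: list, None
--
--     :return:
--         CO2MPAS models import paths.
--     :rtype: list
--     """
--
--     co2mpas_model = [
--         'batch.vehicle_processing_model',
--         #+
--         'report.report',
--         'io.load_inputs',
--         'io.write_outputs',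
--         #+
--
--     ] + [
--         'model.%s' % k for k in
--         [
--             'model',
--             'selector.selector',
--             'selector.co2_params.co2_params_selector'
--         ] + ['physical.%s' % k for k in
--              [
--             'physical',
--             'vehicle.vehicle',
--             'wheels.wheels',
--             'final_drive.final_drive',
--             'clutch_tc.clutch_torque_converter',
--             'clutch_tc.clutch.clutch',
--             'clutch_tc.torque_converter.torque_converter',
--             'electrics.electrics',
--             'electrics.electrics_prediction.electrics_prediction',
--             'engine.engine',
--             'engine.co2_emission.co2_emission',
--             'gear_box.gear_box',
--             'gear_box.thermal.thermal',
--             'gear_box.at_gear.at_gear',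
--             'gear_box.at_gear.at_cmv',
--             'gear_box.at_gear.at_cmv_cold_hot',
--             'gear_box.at_gear.at_dt_va',
--             'gear_box.at_gear.at_dt_vap',
--             'gear_box.at_gear.at_dt_vat',
--             'gear_box.at_gear.at_dt_vatp',
--             'gear_box.at_gear.at_gspv',
--             'gear_box.at_gear.at_gspv_cold_hot',
--         ]]
--     ]
--
--     co2mpas_model = {'co2mpas.%s' % k for k in co2mpas_model}
--
--     if not model_ids:
--         models = co2mpas_model
--     else:
--         model_ids = set(model_ids)
--         models = model_ids.intersection(co2mpas_model)
--         for model_id in model_ids - models: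
--             models.update(k for k in co2mpas_model if model_id in k)
--
--     return sorted(models)
-- ===== SOURCE B (Python) =====
-- # B: precomputed sorted tuple of the paths + one ordered filtering pass (no set
-- # building, no sort at call time); exact-path ids match only themselves, other ids
-- # match as substrings, exactly as A.
-- _PATHS = (
--     'co2mpas.batch.vehicle_processing_model',
--     'co2mpas.io.load_inputs',
--     'co2mpas.io.write_outputs',
--     'co2mpas.model.model',
--     'co2mpas.model.physical.clutch_tc.clutch.clutch',
--     'co2mpas.model.physical.clutch_tc.clutch_torque_converter',
--     'co2mpas.model.physical.clutch_tc.torque_converter.torque_converter',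
--     'co2mpas.model.physical.electrics.electrics',
--     'co2mpas.model.physical.electrics.electrics_prediction.electrics_prediction',
--     'co2mpas.model.physical.engine.co2_emission.co2_emission',
--     'co2mpas.model.physical.engine.engine',
--     'co2mpas.model.physical.final_drive.final_drive',
--     'co2mpas.model.physical.gear_box.at_gear.at_cmv',
--     'co2mpas.model.physical.gear_box.at_gear.at_cmv_cold_hot',
--     'co2mpas.model.physical.gear_box.at_gear.at_dt_va',
--     'co2mpas.model.physical.gear_box.at_gear.at_dt_vap',
--     'co2mpas.model.physical.gear_box.at_gear.at_dt_vat',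
--     'co2mpas.model.physical.gear_box.at_gear.at_dt_vatp',
--     'co2mpas.model.physical.gear_box.at_gear.at_gear',
--     'co2mpas.model.physical.gear_box.at_gear.at_gspv',
--     'co2mpas.model.physical.gear_box.at_gear.at_gspv_cold_hot',
--     'co2mpas.model.physical.gear_box.gear_box',
--     'co2mpas.model.physical.gear_box.thermal.thermal',
--     'co2mpas.model.physical.physical',
--     'co2mpas.model.physical.vehicle.vehicle',
--     'co2mpas.model.physical.wheels.wheels',
--     'co2mpas.model.selector.co2_params.co2_params_selector',
--     'co2mpas.model.selector.selector',
--     'co2mpas.report.report',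
-- )
--
--
-- def get_model_paths(model_ids=None):
--     if not model_ids:
--         return list(_PATHS)
--     return [k for k in _PATHS
--             if k in model_ids
--             or any(m in k and m not in _PATHS for m in model_ids)]
-- ===== Notes on version B (the rewrite author's own statement) =====
-- stated objective: faster
-- what changed: Replaces the per-call nested-comprehension construction, set intersection and set-update loop plus final sort with a precomputed sorted constant tuple and a single order-preserving filtering pass (no result set and no sort at call time).
import Mathlib
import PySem

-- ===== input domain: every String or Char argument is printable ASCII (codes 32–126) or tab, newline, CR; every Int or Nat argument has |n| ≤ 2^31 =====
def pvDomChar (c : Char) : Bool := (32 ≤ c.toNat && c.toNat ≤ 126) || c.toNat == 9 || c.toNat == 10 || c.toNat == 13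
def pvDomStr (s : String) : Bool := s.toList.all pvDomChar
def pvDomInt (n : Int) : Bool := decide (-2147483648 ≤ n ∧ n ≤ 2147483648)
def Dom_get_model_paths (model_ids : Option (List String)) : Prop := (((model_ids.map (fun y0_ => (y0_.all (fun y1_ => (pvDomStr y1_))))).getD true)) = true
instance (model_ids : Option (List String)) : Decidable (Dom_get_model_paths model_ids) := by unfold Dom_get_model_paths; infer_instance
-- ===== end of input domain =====

-- B replaces A's per-call set construction + intersection + update loop + sort by a
-- precomputed sorted constant list and one order-preserving filtering pass.

-- ===== PORT A =====
-- A's local constant co2mpas_model, lifted to a helper def (same construction).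
def pvA_co2mpas_model : List String :=
    ["batch.vehicle_processing_model", "report.report", "io.load_inputs", "io.write_outputs"]
    ++ ((["model", "selector.selector", "selector.co2_params.co2_params_selector"]
         ++ (["physical", "vehicle.vehicle", "wheels.wheels", "final_drive.final_drive",
              "clutch_tc.clutch_torque_converter", "clutch_tc.clutch.clutch",
              "clutch_tc.torque_converter.torque_converter", "electrics.electrics",
              "electrics.electrics_prediction.electrics_prediction", "engine.engine",
              "engine.co2_emission.co2_emission", "gear_box.gear_box", "gear_box.thermal.thermal",
              "gear_box.at_gear.at_gear", "gear_box.at_gear.at_cmv", "gear_box.at_gear.at_cmv_cold_hot",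
              "gear_box.at_gear.at_dt_va", "gear_box.at_gear.at_dt_vap", "gear_box.at_gear.at_dt_vat",
              "gear_box.at_gear.at_dt_vatp", "gear_box.at_gear.at_gspv",
              "gear_box.at_gear.at_gspv_cold_hot"].map (fun k => "physical." ++ k))
        ).map (fun k => "model." ++ k))

-- A's local co2mpas_set = {'co2mpas.%s' % k for k in co2mpas_model}
def pvA_co2mpas_set : PySem.Set String :=
  PySem.Set.ofList (pvA_co2mpas_model.map (fun k => "co2mpas." ++ k))

def get_model_paths (model_ids : Option (List String)) : List String :=
  match model_ids with
  | none => PySem.List.sorted pvA_co2mpas_set (fun x => x)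
  | some ids =>
    if ids.isEmpty then PySem.List.sorted pvA_co2mpas_set (fun x => x)
    else
      let idsSet : PySem.Set String := PySem.Set.ofList ids
      let models : PySem.Set String := PySem.Set.inter idsSet pvA_co2mpas_set
      -- for model_id in model_ids - models: models.update(k for k in co2mpas_model if model_id in k)
      -- (set-iteration order; the result is consumed only by sorted, so order does not matter)
      let models2 : PySem.Set String :=
        (PySem.Set.diff idsSet models).foldl
          (fun s mid => PySem.Set.update s (pvA_co2mpas_set.filter (fun k => PySem.Str.isIn mid k))) models
      PySem.List.sorted models2 (fun x => x)

-- ===== PORT B =====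
def pvPATHS : List String :=
  ["co2mpas.batch.vehicle_processing_model",
  "co2mpas.io.load_inputs",
  "co2mpas.io.write_outputs",
  "co2mpas.model.model",
  "co2mpas.model.physical.clutch_tc.clutch.clutch",
  "co2mpas.model.physical.clutch_tc.clutch_torque_converter",
  "co2mpas.model.physical.clutch_tc.torque_converter.torque_converter",
  "co2mpas.model.physical.electrics.electrics",
  "co2mpas.model.physical.electrics.electrics_prediction.electrics_prediction",
  "co2mpas.model.physical.engine.co2_emission.co2_emission",
  "co2mpas.model.physical.engine.engine",
  "co2mpas.model.physical.final_drive.final_drive",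
  "co2mpas.model.physical.gear_box.at_gear.at_cmv",
  "co2mpas.model.physical.gear_box.at_gear.at_cmv_cold_hot",
  "co2mpas.model.physical.gear_box.at_gear.at_dt_va",
  "co2mpas.model.physical.gear_box.at_gear.at_dt_vap",
  "co2mpas.model.physical.gear_box.at_gear.at_dt_vat",
  "co2mpas.model.physical.gear_box.at_gear.at_dt_vatp",
  "co2mpas.model.physical.gear_box.at_gear.at_gear",
  "co2mpas.model.physical.gear_box.at_gear.at_gspv",
  "co2mpas.model.physical.gear_box.at_gear.at_gspv_cold_hot",
  "co2mpas.model.physical.gear_box.gear_box",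
  "co2mpas.model.physical.gear_box.thermal.thermal",
  "co2mpas.model.physical.physical",
  "co2mpas.model.physical.vehicle.vehicle",
  "co2mpas.model.physical.wheels.wheels",
  "co2mpas.model.selector.co2_params.co2_params_selector",
  "co2mpas.model.selector.selector",
  "co2mpas.report.report"]

def get_model_paths_alt (model_ids : Option (List String)) : List String :=
  match model_ids with
  | none => pvPATHS
  | some ids =>
    if ids.isEmpty then pvPATHS
    else pvPATHS.filter (fun k =>
      ids.contains k || ids.any (fun m => PySem.Str.isIn m k && !(pvPATHS.contains m)))

-- ===== PRECONDITION & SPEC =====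
def Spec_get_model_paths (model_ids : Option (List String)) (out : List String) : Prop := out = get_model_paths_alt model_ids
instance (model_ids : Option (List String)) (out : List String) : Decidable (Spec_get_model_paths model_ids out) := by unfold Spec_get_model_paths; infer_instance

-- ===== CLAIM (what is proved, stated in full; the proofs are below) =====
def Claim_equal_get_model_paths : Prop := ∀ (model_ids : Option (List String)), Dom_get_model_paths model_ids → Spec_get_model_paths model_ids (get_model_paths model_ids)

-- ===== LEMMAS AND PROOFS =====

-- A's 29 paths in their insertion order.
def pvRAW : List String :=
  ["co2mpas.batch.vehicle_processing_model",
  "co2mpas.report.report",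
  "co2mpas.io.load_inputs",
  "co2mpas.io.write_outputs",
  "co2mpas.model.model",
  "co2mpas.model.selector.selector",
  "co2mpas.model.selector.co2_params.co2_params_selector",
  "co2mpas.model.physical.physical",
  "co2mpas.model.physical.vehicle.vehicle",
  "co2mpas.model.physical.wheels.wheels",
  "co2mpas.model.physical.final_drive.final_drive",
  "co2mpas.model.physical.clutch_tc.clutch_torque_converter",
  "co2mpas.model.physical.clutch_tc.clutch.clutch",
  "co2mpas.model.physical.clutch_tc.torque_converter.torque_converter",
  "co2mpas.model.physical.electrics.electrics",
  "co2mpas.model.physical.electrics.electrics_prediction.electrics_prediction",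
  "co2mpas.model.physical.engine.engine",
  "co2mpas.model.physical.engine.co2_emission.co2_emission",
  "co2mpas.model.physical.gear_box.gear_box",
  "co2mpas.model.physical.gear_box.thermal.thermal",
  "co2mpas.model.physical.gear_box.at_gear.at_gear",
  "co2mpas.model.physical.gear_box.at_gear.at_cmv",
  "co2mpas.model.physical.gear_box.at_gear.at_cmv_cold_hot",
  "co2mpas.model.physical.gear_box.at_gear.at_dt_va",
  "co2mpas.model.physical.gear_box.at_gear.at_dt_vap",
  "co2mpas.model.physical.gear_box.at_gear.at_dt_vat",
  "co2mpas.model.physical.gear_box.at_gear.at_dt_vatp",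
  "co2mpas.model.physical.gear_box.at_gear.at_gspv",
  "co2mpas.model.physical.gear_box.at_gear.at_gspv_cold_hot"]

theorem pv_raw_perm : pvPATHS.Perm pvRAW := by decide

theorem pv_paths_pairwise : pvPATHS.Pairwise (fun a b => a < b) := by
  have h : pvPATHS.Pairwise (fun a b => a.toList < b.toList) := by decide
  exact h.imp (fun hx => String.lt_iff_toList_lt.mpr hx)

theorem pv_mem_foldl_update {f : String → List String} (l : List String)
    (s : PySem.Set String) (y : String) :
    y ∈ l.foldl (fun s mid => PySem.Set.update s (f mid)) s ↔
      y ∈ s ∨ ∃ mid ∈ l, y ∈ f mid := by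
  induction l generalizing s with
  | nil => simp
  | cons h t ih => simp [List.foldl_cons, ih, PySem.Set.mem_update]; tauto

theorem pv_logic {α : Type} (P I : α → Prop) (Q : α → α → Prop) (y : α) :
    (P y ∧ (I y ∨ ∃ x, I x ∧ Q x y ∧ ¬ P x)) ↔
      ((I y ∧ P y) ∨ ∃ m, (I m ∧ ¬(I m ∧ P m)) ∧ P y ∧ Q m y) := by
  constructor
  · rintro ⟨hy, hI | ⟨x, hIx, hQ, hnP⟩⟩
    · exact Or.inl ⟨hI, hy⟩
    · exact Or.inr ⟨x, ⟨hIx, fun h => hnP h.2⟩, hy, hQ⟩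
  · rintro (⟨hI, hy⟩ | ⟨m, ⟨hIm, hn⟩, hy, hQ⟩)
    · exact ⟨hy, Or.inl hI⟩
    · exact ⟨hy, Or.inr ⟨m, hIm, hQ, fun hP => hn ⟨hIm, hP⟩⟩⟩

theorem pv_nodup_foldl_update {f : String → List String} (l : List String)
    (s : PySem.Set String) (hs : s.Nodup) :
    (l.foldl (fun s mid => PySem.Set.update s (f mid)) s).Nodup := by
  induction l generalizing s with
  | nil => exact hs
  | cons h t ih => exact ih _ (PySem.Set.nodup_update _ _ hs)

-- ===== VERDICT (by name: the statement is the Claim_ definition above) =====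
set_option maxRecDepth 16384 in
theorem pv_set_eq : pvA_co2mpas_set = pvRAW := by decide

theorem pv_mem_set (z : String) : z ∈ pvA_co2mpas_set ↔ z ∈ pvPATHS := by
  rw [pv_set_eq]; exact pv_raw_perm.mem_iff.symm

theorem pv_paths_nodup : pvPATHS.Nodup := by decide

set_option maxRecDepth 16384 in
theorem get_model_paths_spec : Claim_equal_get_model_paths := by
  intro model_ids _
  unfold Spec_get_model_paths get_model_paths get_model_paths_alt
  have hsortall : PySem.List.sorted pvA_co2mpas_set (fun x => x) = pvPATHS := by
    rw [pv_set_eq]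
    exact PySem.List.sorted_eq_of_perm_of_pairwise_lt _ _ _ pv_raw_perm pv_paths_pairwise
  cases model_ids with
  | none => exact hsortall
  | some ids =>
    by_cases hemp : ids.isEmpty
    · simp [hemp, hsortall]
    · simp only [hemp, if_neg, Bool.false_eq_true, not_false_eq_true]
      apply PySem.List.sorted_eq_of_perm_of_pairwise_lt
      · apply (List.perm_ext_iff_of_nodup (List.Nodup.filter _ pv_paths_nodup)
          (pv_nodup_foldl_update _ _ (PySem.Set.nodup_inter _ _ (PySem.Set.nodup_ofList ids)))).mpr
        have hc : ∀ x : String, (pvPATHS.contains x = false) ↔ x ∉ pvPATHS := by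
          intro x; simp
        intro y
        rw [pv_mem_foldl_update]
        simp only [List.mem_filter, PySem.Set.mem_inter, PySem.Set.mem_diff,
          PySem.Set.mem_ofList, pv_mem_set, List.any_eq_true, Bool.or_eq_true,
          Bool.and_eq_true, Bool.not_eq_true', List.contains_iff_mem, hc]
        exact pv_logic (· ∈ pvPATHS) (· ∈ ids) (fun m z => PySem.Str.isIn m z = true) y
      · exact List.Pairwise.filter _ pv_paths_pairwise
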